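-- pv_equiv track=rewrite | github.com/saxster/DJANGO5-master | apps/core/api_versioning/version_negotiation.py | get_compatible_version
-- ===== SOURCE A (Python) =====
-- def get_compatible_version(client_version: str) -> str:
--     """
--     Get compatible API version for given client SDK version.
--
--     Maps client versions to API versions for backward compatibility.
--     """
--     version_map = {
--         '1.0.0': 'v1',
--         '1.1.0': 'v1',
--         '1.2.0': 'v1',
--         '2.0.0': 'v2',
--     }
--
--     for client_ver, api_ver in sorted(version_map.items(), reverse=True):
--         if client_version >= client_ver:
--             return api_ver
--
--     return 'v1'
-- ===== SOURCE B (Python) =====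
-- def get_compatible_version(client_version: str) -> str:
--     # Every map entry except '2.0.0' yields 'v1', and the fallback is 'v1',
--     # so the only threshold that matters is '2.0.0' (lexicographic, like A).
--     return 'v2' if client_version >= '2.0.0' else 'v1'
-- ===== Notes on version B (the rewrite author's own statement) =====
-- stated objective: simpler
-- what changed: Replaced the dict + reverse-sorted first-match loop with a single closed-form lexicographic comparison against the one threshold key whose mapped value differs from the fallback.
import Mathlib
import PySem

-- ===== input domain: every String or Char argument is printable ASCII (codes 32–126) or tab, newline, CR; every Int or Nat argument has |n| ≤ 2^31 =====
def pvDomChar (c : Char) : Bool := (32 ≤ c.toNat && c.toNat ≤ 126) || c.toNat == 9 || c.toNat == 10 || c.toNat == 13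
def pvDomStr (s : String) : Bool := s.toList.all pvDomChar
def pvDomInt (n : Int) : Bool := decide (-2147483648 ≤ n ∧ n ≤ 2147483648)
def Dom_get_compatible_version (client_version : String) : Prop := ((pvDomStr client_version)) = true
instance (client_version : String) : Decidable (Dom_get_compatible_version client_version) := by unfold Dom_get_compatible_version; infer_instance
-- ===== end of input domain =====

-- B replaces A's dict + reverse-sort + first-match loop by the closed-form conditional
-- `'v2' if client_version >= '2.0.0' else 'v1'` (simpler; same lexicographic comparison).

-- ===== PORT A =====
-- the `for client_ver, api_ver in …: if client_version >= client_ver: return api_ver` loop;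
-- Python's `s >= t` on str is ¬(s < t) code-point lexicographic = !(PySem.Chars.strLt s.toList t.toList)
def gcvLoop (client_version : String) : List (String × String) → String
  | [] => "v1"
  | (client_ver, api_ver) :: rest =>
      if !(PySem.Chars.strLt client_version.toList client_ver.toList) then api_ver
      else gcvLoop client_version rest

def get_compatible_version (client_version : String) : String :=
  let version_map : List (String × String) :=
    [("1.0.0", "v1"), ("1.1.0", "v1"), ("1.2.0", "v1"), ("2.0.0", "v2")]
  -- the keys are pairwise distinct, so Python's reverse tuple sort = sorting by the key component
  gcvLoop client_version (PySem.List.sorted version_map (fun p => p.1.toList) true)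

-- ===== PORT B =====
def get_compatible_version_alt (client_version : String) : String :=
  if !(PySem.Chars.strLt client_version.toList "2.0.0".toList) then "v2" else "v1"

-- ===== PRECONDITION & SPEC =====
def Spec_get_compatible_version (client_version : String) (out : String) : Prop := out = get_compatible_version_alt client_version
instance (client_version : String) (out : String) : Decidable (Spec_get_compatible_version client_version out) := by unfold Spec_get_compatible_version; infer_instance

-- ===== CLAIM (what is proved, stated in full; the proofs are below) =====
def Claim_equal_get_compatible_version : Prop := ∀ (client_version : String), Dom_get_compatible_version client_version → Spec_get_compatible_version client_version (get_compatible_version client_version)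

-- ===== LEMMAS AND PROOFS =====
theorem gcv_sorted_eval :
    PySem.List.sorted [("1.0.0", "v1"), ("1.1.0", "v1"), ("1.2.0", "v1"), ("2.0.0", "v2")]
      (fun p : String × String => p.1.toList) true
    = [("2.0.0", "v2"), ("1.2.0", "v1"), ("1.1.0", "v1"), ("1.0.0", "v1")] := by decide

-- ===== VERDICT (by name: the statement is the Claim_ definition above) =====
theorem get_compatible_version_spec : Claim_equal_get_compatible_version := by
  intro cv _
  unfold Spec_get_compatible_version
  simp only [get_compatible_version, get_compatible_version_alt, gcv_sorted_eval, gcvLoop]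
  split_ifs <;> rfl
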